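-- pv_equiv track=rewrite | github.com/JonasSejr/MLAU | Python/src/Handin 3/AnnotationConverter.py | find_start_codons
-- ===== SOURCE A (Python) =====
-- def find_start_codons(sequences, training_pairs):
--     start_codon_map = {}
--     for pair in training_pairs:
--         annotations = sequences[pair[1]]
--         observations = sequences[pair[0]]
--         for i in range(len(annotations)):
--             if (annotations[i] == 'C') and (i == 0 or annotations[i - 1] == 'N'):
--                 codon = observations[i]
--                 if i + 1 < len(annotations):
--                     codon = codon + observations[i + 1]
--                 if i + 2 < len(annotations):
--                     codon = codon + observations[i + 2]
--                 if (codon not in start_codon_map.keys()):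
--                     start_codon_map[codon] = 1
--                 else:
--                     start_codon_map[codon] += 1
--     return start_codon_map
-- ===== SOURCE B (Python) =====
-- def _start_positions(ann):
--     # boundaries found by substring search for "NC", plus a start at index 0
--     starts = [0] if ann[:1] == 'C' else []
--     j = ann.find('NC')
--     while j != -1:
--         starts.append(j + 1)
--         j = ann.find('NC', j + 1)
--     return starts
--
--
-- def find_start_codons(sequences, training_pairs):
--     counts = {}
--     for obs_key, ann_key in training_pairs:
--         ann = sequences[ann_key]
--         obs = sequences[obs_key]
--         for i in _start_positions(ann):
--             codon = obs[i:i + 3][:len(ann) - i]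
--             counts[codon] = counts.get(codon, 0) + 1
--     return counts
-- ===== Notes on version B (the rewrite author's own statement) =====
-- stated objective: alternative
-- what changed: B is staged: it first computes all start positions by substring search with str.find('NC', ...) (plus a slice test for a start at index 0), then counts the sliced codons over that positions list, instead of A's single index loop testing annotations[i] and annotations[i-1] at every index.
import Mathlib
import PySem

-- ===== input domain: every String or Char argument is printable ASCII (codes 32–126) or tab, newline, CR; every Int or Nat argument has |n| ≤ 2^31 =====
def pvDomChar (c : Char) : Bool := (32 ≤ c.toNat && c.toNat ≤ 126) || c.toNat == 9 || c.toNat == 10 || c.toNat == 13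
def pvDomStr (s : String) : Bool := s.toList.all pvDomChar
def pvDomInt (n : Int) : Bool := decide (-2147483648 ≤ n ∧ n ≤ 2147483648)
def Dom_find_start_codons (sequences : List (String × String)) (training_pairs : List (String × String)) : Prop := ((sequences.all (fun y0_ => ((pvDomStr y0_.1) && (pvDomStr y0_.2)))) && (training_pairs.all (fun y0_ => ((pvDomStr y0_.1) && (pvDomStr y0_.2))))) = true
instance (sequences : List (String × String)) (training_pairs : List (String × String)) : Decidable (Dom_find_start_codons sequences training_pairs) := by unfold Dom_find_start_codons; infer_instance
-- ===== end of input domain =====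

-- B finds the start positions by SUBSTRING SEARCH (str.find of "NC", staged into a positions
-- pass followed by a counting pass) instead of A's per-index loop testing annotations[i] and
-- annotations[i-1]; same cost, a different decomposition and search mechanism.

-- shared helper: sequences[key] (Python dict lookup), with "" as the out-of-Pre_ default
def pvSeq (sequences : List (String × String)) (k : String) : List Char :=
  (((PySem.Dict.ofList sequences).get? k).getD "").toList

-- ===== PORT A =====
def pvStepA (ann obs : List Char) (m : PySem.Dict String Int) (i : Nat) : PySem.Dict String Int :=
  if ann.getD i ' ' = 'C' ∧ (i = 0 ∨ ann.getD (i - 1) ' ' = 'N') then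
    let c1 := [obs.getD i ' ']
    let c2 := if i + 1 < ann.length then c1 ++ [obs.getD (i + 1) ' '] else c1
    let c3 := if i + 2 < ann.length then c2 ++ [obs.getD (i + 2) ' '] else c2
    let key := String.ofList c3
    if m.contains key = false then m.insert key 1
    else m.insert key (m.getD key 0 + 1)
  else m

def find_start_codons (sequences : List (String × String)) (training_pairs : List (String × String)) : List (String × Int) :=
  (training_pairs.foldl (fun m pair =>
      let ann := pvSeq sequences pair.2
      let obs := pvSeq sequences pair.1
      (List.range ann.length).foldl (pvStepA ann obs) m)
    PySem.Dict.empty).items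

-- ===== PORT B =====
-- the fuel (ann.length + 1) only makes the Python while-loop structural: each successful
-- find returns a strictly larger index below ann.length, so the fuel never runs out
def pvNCloop (ann : List Char) : Nat → Int → List Int
  | 0, _ => []
  | fuel + 1, j =>
    if j = -1 then []
    else (j + 1) :: pvNCloop ann fuel (PySem.Chars.findFrom ann ['N', 'C'] (j + 1))

def pvStartPositions (ann : List Char) : List Int :=
  (if PySem.List.slice ann none (some 1) = ['C'] then [(0 : Int)] else []) ++
    pvNCloop ann (ann.length + 1) (PySem.Chars.find ann ['N', 'C'])

def pvStepB (ann obs : List Char) (counts : PySem.Dict String Int) (i : Int) : PySem.Dict String Int :=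
  let codon := String.ofList (PySem.List.slice (PySem.List.slice obs (some i) (some (i + 3)))
                            none (some ((ann.length : Int) - i)))
  counts.insert codon (counts.getD codon 0 + 1)

def find_start_codons_alt (sequences : List (String × String)) (training_pairs : List (String × String)) : List (String × Int) :=
  (training_pairs.foldl (fun counts pair =>
      let ann := pvSeq sequences pair.2
      let obs := pvSeq sequences pair.1
      (pvStartPositions ann).foldl (pvStepB ann obs) counts)
    PySem.Dict.empty).items

-- ===== PRECONDITION & SPEC =====
-- at every start-codon position of ann, the observation indices A reads are in range
def pvIdxOK (ann obs : List Char) : Bool :=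
  (List.range ann.length).all (fun i =>
    !(ann.getD i ' ' == 'C' && (i == 0 || ann.getD (i - 1) ' ' == 'N')) ||
    (decide (i < obs.length)
      && (!(decide (i + 1 < ann.length)) || decide (i + 1 < obs.length))
      && (!(decide (i + 2 < ann.length)) || decide (i + 2 < obs.length))))

-- exactly the inputs on which A returns: every pair's two keys are present in sequences
-- (else KeyError) and every observation index read at a start-codon position is in range (else IndexError)
def Pre_find_start_codons (sequences : List (String × String)) (training_pairs : List (String × String)) : Prop :=
  ∀ p ∈ training_pairs,
    ((PySem.Dict.ofList sequences).get? p.1).isSome = true ∧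
    ((PySem.Dict.ofList sequences).get? p.2).isSome = true ∧
    pvIdxOK (pvSeq sequences p.2) (pvSeq sequences p.1) = true
instance (sequences : List (String × String)) (training_pairs : List (String × String)) : Decidable (Pre_find_start_codons sequences training_pairs) := by unfold Pre_find_start_codons; infer_instance

def pvWitness_find_start_codons : (List (String × String)) × (List (String × String)) :=
  ([("x", "ACGT"), ("y", "NCNN")], [("x", "y")])

def Spec_find_start_codons (sequences : List (String × String)) (training_pairs : List (String × String)) (out : List (String × Int)) : Prop := out = find_start_codons_alt sequences training_pairs
instance (sequences : List (String × String)) (training_pairs : List (String × String)) (out : List (String × Int)) : Decidable (Spec_find_start_codons sequences training_pairs out) := by unfold Spec_find_start_codons; infer_instance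

-- ===== CLAIM (what is proved, stated in full; the proofs are below) =====
def Claim_equal_find_start_codons : Prop := ∀ (sequences : List (String × String)) (training_pairs : List (String × String)), Dom_find_start_codons sequences training_pairs → Pre_find_start_codons sequences training_pairs → Spec_find_start_codons sequences training_pairs (find_start_codons sequences training_pairs)

-- ===== LEMMAS AND PROOFS =====

-- A's guard at index i, as a Bool predicate
def pvGuard (ann : List Char) (i : Nat) : Bool :=
  decide (ann.getD i ' ' = 'C' ∧ (i = 0 ∨ ann.getD (i - 1) ' ' = 'N'))

-- the "NC"-occurrence positions of ann at or after k, in increasing order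
def pvNcPos (ann : List Char) (k : Nat) : List Nat :=
  (List.range' k (ann.length - k)).filter (fun j => decide (['N', 'C'] <+: ann.drop j))

theorem pv_prefixNC (xs : List Char) :
    (['N', 'C'] <+: xs) ↔ 2 ≤ xs.length ∧ xs.getD 0 ' ' = 'N' ∧ xs.getD 1 ' ' = 'C' := by
  match xs with
  | [] => simp
  | [a] => simp [List.cons_prefix_cons]
  | a :: b :: t => simp [List.cons_prefix_cons, eq_comm]

theorem pv_prefixNC_drop (ann : List Char) (j : Nat) :
    (['N', 'C'] <+: ann.drop j) ↔
      j + 1 < ann.length ∧ ann.getD j ' ' = 'N' ∧ ann.getD (j + 1) ' ' = 'C' := by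
  rw [pv_prefixNC]
  simp only [List.length_drop, List.getD_eq_getElem?_getD, List.getElem?_drop]
  constructor
  · rintro ⟨h, h0, h1⟩; exact ⟨by omega, by simpa using h0, by simpa using h1⟩
  · rintro ⟨h, h0, h1⟩; exact ⟨by omega, by simpa using h0, by simpa using h1⟩

theorem pv_infix_drop {ann : List Char} {j k : Nat} (hk : k ≤ j)
    (h : ['N', 'C'] <+: ann.drop j) : ['N', 'C'] <:+: ann.drop k := by
  have hd : ann.drop j = (ann.drop k).drop (j - k) := by
    rw [List.drop_drop]; congr 1; omega
  rw [hd] at h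
  exact h.isInfix.trans (List.drop_suffix _ _).isInfix

theorem pv_ncPos_nil {ann : List Char} {k : Nat}
    (hno : ¬ ['N', 'C'] <:+: ann.drop k) : pvNcPos ann k = [] := by
  rw [pvNcPos, List.filter_eq_nil_iff]
  intro j hj
  simp only [List.mem_range'] at hj
  obtain ⟨i, hi, rfl⟩ := hj
  simp only [decide_eq_true_eq]
  exact fun hpre => hno (pv_infix_drop (by omega) hpre)

theorem pv_ncPos_cons {ann : List Char} {k jn : Nat}
    (hj : ['N', 'C'] <+: ann.drop jn) (hk : k ≤ jn)
    (hmin : ∀ i, k ≤ i → i < jn → ¬ ['N', 'C'] <+: ann.drop i) :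
    pvNcPos ann k = jn :: pvNcPos ann (jn + 1) := by
  have hlt : jn + 1 < ann.length := ((pv_prefixNC_drop ann jn).mp hj).1
  have hsplit : List.range' k (ann.length - k) =
      List.range' k (jn - k) ++ List.range' jn (ann.length - jn) := by
    have := List.range'_append (s := k) (m := jn - k) (n := ann.length - jn) (step := 1)
    rw [show k + 1 * (jn - k) = jn by omega] at this
    rw [this]; congr 1; omega
  rw [pvNcPos, hsplit, List.filter_append]
  have h1 : (List.range' k (jn - k)).filter (fun j => decide (['N', 'C'] <+: ann.drop j)) = [] := by
    rw [List.filter_eq_nil_iff]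
    intro j hj'
    simp only [List.mem_range', one_mul] at hj'
    obtain ⟨i, hi, rfl⟩ := hj'
    simp only [decide_eq_true_eq]
    exact hmin (k + i) (by omega) (by omega)
  have h2 : List.range' jn (ann.length - jn) = jn :: List.range' (jn + 1) (ann.length - (jn + 1)) := by
    rw [show ann.length - jn = (ann.length - (jn + 1)) + 1 by omega, List.range'_succ]
  rw [h1, h2, List.nil_append, List.filter_cons, if_pos (by simpa using hj)]
  rfl

theorem pv_loop_spec (ann : List Char) :
    ∀ (fuel k : Nat), k ≤ ann.length → ann.length - k < fuel →
      pvNCloop ann fuel (PySem.Chars.findFrom ann ['N', 'C'] (k : Int))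
        = (pvNcPos ann k).map (fun (j : Nat) => (j : Int) + 1) := by
  intro fuel
  induction fuel with
  | zero => intro k hk hf; omega
  | succ fuel ih =>
    intro k hk hf
    by_cases hneg : PySem.Chars.findFrom ann ['N', 'C'] (k : Int) = -1
    · rw [pvNCloop, if_pos hneg,
        pv_ncPos_nil ((PySem.Chars.findFrom_natCast_eq_neg_one_iff ann ['N','C'] k hk).mp hneg)]
      rfl
    · obtain ⟨hge, hpre, hmin⟩ := PySem.Chars.findFrom_natCast_spec ann ['N','C'] k hk hneg
      set j := PySem.Chars.findFrom ann ['N', 'C'] (k : Int) with hjdef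
      have hj0 : 0 ≤ j := le_trans (by positivity) hge
      have hjn : j = ((j.toNat : Nat) : Int) := by omega
      have hk' : k ≤ j.toNat := by omega
      have hlt : j.toNat + 1 < ann.length := ((pv_prefixNC_drop ann j.toNat).mp hpre).1
      rw [pvNCloop, if_neg hneg,
        pv_ncPos_cons hpre hk' (fun i h1 h2 => hmin i h1 h2), List.map_cons]
      have hcast : j + 1 = ((j.toNat + 1 : Nat) : Int) := by omega
      rw [hcast, ih (j.toNat + 1) (by omega) (by omega)]
      norm_cast

-- pvStartPositions computes exactly A's guarded index set (as Ints, in increasing order)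
theorem pv_starts_eq (ann : List Char) :
    pvStartPositions ann = ((List.range ann.length).filter (pvGuard ann)).map (fun (i : Nat) => (i : Int)) := by
  have hloop : pvNCloop ann (ann.length + 1) (PySem.Chars.find ann ['N', 'C'])
      = (pvNcPos ann 0).map (fun (j : Nat) => (j : Int) + 1) := by
    rw [← PySem.Chars.findFrom_zero]
    exact_mod_cast pv_loop_spec ann (ann.length + 1) 0 (by omega) (by omega)
  rcases Nat.eq_zero_or_pos ann.length with h0 | hpos
  · have hnil : ann = [] := List.eq_nil_of_length_eq_zero h0
    subst hnil
    rw [pvStartPositions, hloop]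
    simp [pvNcPos, PySem.List.slice_to (xs := ([] : List Char)) (b := 1) (by omega)]
  · -- split range at 0 and shift the tail by one
    have hrange : List.range ann.length = 0 :: List.range' 1 (ann.length - 1) := by
      obtain ⟨n, hn⟩ : ∃ n, ann.length = n + 1 := ⟨ann.length - 1, by omega⟩
      rw [hn, List.range_eq_range', List.range'_succ]
      norm_num
    have hg0 : pvGuard ann 0 = decide (ann.getD 0 ' ' = 'C') := by
      simp [pvGuard]
    have hinit : (if PySem.List.slice ann none (some 1) = ['C'] then [(0 : Int)] else [])
        = if pvGuard ann 0 then [(0 : Int)] else [] := by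
      rw [hg0, PySem.List.slice_to ann (b := 1) (by omega)]
      congr 1
      rcases ann with _ | ⟨a, t⟩
      · simp at hpos
      · simp [List.take_succ_cons, List.getD]
    -- tail: positions ≥ 1 with A's guard are exactly NC-positions + 1
    have htail : (List.range' 1 (ann.length - 1)).filter (pvGuard ann)
        = (pvNcPos ann 0).map (fun j => j + 1) := by
      have hm : List.range' 1 (ann.length - 1) = (List.range (ann.length - 1)).map (fun j => 1 + j) :=
        List.range'_eq_map_range
      rw [hm, List.filter_map]
      have hcong : (List.range (ann.length - 1)).filter (pvGuard ann ∘ fun j => 1 + j)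
          = (List.range (ann.length - 1)).filter (fun j => decide (['N', 'C'] <+: ann.drop j)) := by
        apply List.filter_congr
        intro j hj
        have hjlt : j < ann.length - 1 := List.mem_range.mp hj
        simp only [Function.comp, pvGuard, pv_prefixNC_drop, decide_eq_decide]
        constructor
        · rintro ⟨hc, h0 | hn⟩
          · omega
          · exact ⟨by omega, by simpa using hn, by simpa [Nat.add_comm] using hc⟩
        · rintro ⟨_, hn, hc⟩
          exact ⟨by simpa [Nat.add_comm] using hc, Or.inr (by simpa using hn)⟩
      have hncfull : pvNcPos ann 0 = (List.range (ann.length - 1)).filter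
          (fun j => decide (['N', 'C'] <+: ann.drop j)) := by
        rw [pvNcPos, Nat.sub_zero, ← List.range_eq_range',
          show ann.length = (ann.length - 1) + 1 by omega, List.range_succ, List.filter_append]
        have : (decide (['N', 'C'] <+: ann.drop (ann.length - 1))) = false := by
          simp only [decide_eq_false_iff_not, pv_prefixNC_drop]
          omega
        simp [this]
      rw [hcong, hncfull]
      apply List.map_congr_left
      intro j _
      omega
    rw [pvStartPositions, hloop, hrange, List.filter_cons, hinit]
    have hmm : List.map (fun (i : Nat) => (i : Int)) ((List.range' 1 (ann.length - 1)).filter (pvGuard ann))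
        = List.map (fun (j : Nat) => (j : Int) + 1) (pvNcPos ann 0) := by
      rw [htail, List.map_map]
      apply List.map_congr_left
      intro j _
      simp
    by_cases hg : pvGuard ann 0
    · rw [if_pos hg, if_pos hg, List.map_cons, hmm]
      simp
    · rw [if_neg hg, if_neg (by simpa using hg), List.nil_append, hmm]

-- the two dict-update shapes agree
theorem pv_update_eq (m : PySem.Dict String Int) (key : String) :
    (if m.contains key = false then m.insert key 1 else m.insert key (m.getD key 0 + 1))
      = m.insert key (m.getD key 0 + 1) := by
  by_cases h : m.contains key = false
  · rw [if_pos h, PySem.Dict.getD_of_not_contains m 0 h]; norm_num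
  · simp [h]

-- A's conditionally-built codon, given the indices are in range
theorem pv_codonA_eq (ann obs : List Char) (i : Nat) (hi : i < ann.length)
    (h1 : i < obs.length) (h2 : i + 1 < ann.length → i + 1 < obs.length)
    (h3 : i + 2 < ann.length → i + 2 < obs.length) :
    (let c1 := [obs.getD i ' ']
     let c2 := if i + 1 < ann.length then c1 ++ [obs.getD (i + 1) ' '] else c1
     if i + 2 < ann.length then c2 ++ [obs.getD (i + 2) ' '] else c2)
      = (obs.drop i).take (min 3 (ann.length - i)) := by
  by_cases hA : i + 2 < ann.length
  · have e3 : min 3 (ann.length - i) = 3 := by omega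
    rw [e3, List.drop_eq_getElem_cons h1, List.drop_eq_getElem_cons (h2 (by omega)),
        List.drop_eq_getElem_cons (h3 hA)]
    simp only [if_pos hA, if_pos (show i + 1 < ann.length by omega), List.take_succ_cons,
      List.take_zero, List.getD_eq_getElem _ _ h1, List.getD_eq_getElem _ _ (h2 (by omega)),
      List.getD_eq_getElem _ _ (h3 hA), List.cons_append, List.nil_append]
  · by_cases hB : i + 1 < ann.length
    · have e2 : min 3 (ann.length - i) = 2 := by omega
      rw [e2, List.drop_eq_getElem_cons h1, List.drop_eq_getElem_cons (h2 hB)]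
      simp only [if_neg hA, if_pos hB, List.take_succ_cons, List.take_zero,
        List.getD_eq_getElem _ _ h1, List.getD_eq_getElem _ _ (h2 hB),
        List.cons_append, List.nil_append]
    · have e1 : min 3 (ann.length - i) = 1 := by omega
      rw [e1, List.drop_eq_getElem_cons h1]
      simp only [if_neg hA, if_neg hB, List.take_succ_cons, List.take_zero,
        List.getD_eq_getElem _ _ h1]

-- B's double slice computes the same codon
theorem pv_codonB_eq (ann obs : List Char) (i : Nat) (hi : i < ann.length) :
    PySem.List.slice (PySem.List.slice obs (some (i : Int)) (some ((i : Int) + 3)))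
        none (some ((ann.length : Int) - (i : Int)))
      = (obs.drop i).take (min 3 (ann.length - i)) := by
  have h1 : PySem.List.slice obs (some (i : Int)) (some ((i : Int) + 3)) = (obs.drop i).take 3 := by
    rw [PySem.List.slice_toNat obs (by positivity) (by positivity)]
    congr 1
    omega
  have hb : (0 : Int) ≤ (ann.length : Int) - (i : Int) := by omega
  rw [h1, PySem.List.slice_to _ hb, List.take_take]
  congr 1
  omega

-- the inner loops agree: A's guarded fold over all indices = B's fold over the found positions
theorem pv_inner (ann obs : List Char) (hOK : pvIdxOK ann obs = true) (m : PySem.Dict String Int) :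
    (List.range ann.length).foldl (pvStepA ann obs) m
      = (pvStartPositions ann).foldl (pvStepB ann obs) m := by
  rw [pv_starts_eq, List.foldl_map]
  have hstepA : ∀ (m : PySem.Dict String Int) (i : Nat),
      pvStepA ann obs m i = if pvGuard ann i then pvStepA ann obs m i else m := by
    intro m i
    by_cases h : pvGuard ann i
    · rw [if_pos h]
    · rw [if_neg h, pvStepA, if_neg (by simpa [pvGuard] using h)]
  calc (List.range ann.length).foldl (pvStepA ann obs) m
      = (List.range ann.length).foldl (fun m i => if pvGuard ann i then pvStepA ann obs m i else m) m := by
        apply PySem.List.foldl_congr_mem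
        intro acc i _
        exact hstepA acc i
    _ = ((List.range ann.length).filter (pvGuard ann)).foldl (pvStepA ann obs) m := by
        rw [List.foldl_filter]
    _ = ((List.range ann.length).filter (pvGuard ann)).foldl
          (fun (m : PySem.Dict String Int) (i : Nat) => pvStepB ann obs m (i : Int)) m := by
        apply PySem.List.foldl_congr_mem
        intro acc i hi
        have hmem := List.mem_filter.mp hi
        have hilt : i < ann.length := List.mem_range.mp hmem.1
        have hg : ann.getD i ' ' = 'C' ∧ (i = 0 ∨ ann.getD (i - 1) ' ' = 'N') := by
          simpa [pvGuard] using hmem.2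
        have hOKi : i < obs.length ∧ (i + 1 < ann.length → i + 1 < obs.length)
            ∧ (i + 2 < ann.length → i + 2 < obs.length) := by
          simp only [pvIdxOK, List.all_eq_true, List.mem_range] at hOK
          have hOKs := hOK i hilt
          simp at hOKs
          have hg' := hg
          simp only [List.getD_eq_getElem?_getD] at hg'
          rcases hOKs with hbad | hok
          · exact absurd hg' (by tauto)
          · obtain ⟨⟨ho1, ho2⟩, ho3⟩ := hok
            exact ⟨ho1, fun h => ho2.resolve_left (by omega), fun h => ho3.resolve_left (by omega)⟩
        rw [pvStepA, if_pos hg, pvStepB]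
        simp only []
        rw [pv_update_eq, pv_codonA_eq ann obs i hilt hOKi.1 hOKi.2.1 hOKi.2.2,
          pv_codonB_eq ann obs i hilt]

theorem pv_outer (sequences : List (String × String)) :
    ∀ (pairs : List (String × String)) (m : PySem.Dict String Int),
      (∀ p ∈ pairs, pvIdxOK (pvSeq sequences p.2) (pvSeq sequences p.1) = true) →
      pairs.foldl (fun m pair =>
          (List.range (pvSeq sequences pair.2).length).foldl
            (pvStepA (pvSeq sequences pair.2) (pvSeq sequences pair.1)) m) m
        = pairs.foldl (fun counts pair =>
            (pvStartPositions (pvSeq sequences pair.2)).foldl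
              (pvStepB (pvSeq sequences pair.2) (pvSeq sequences pair.1)) counts) m := by
  intro pairs
  induction pairs with
  | nil => intro m _; rfl
  | cons p rest ih =>
    intro m h
    simp only [List.foldl_cons]
    rw [pv_inner _ _ (h p (by simp)) m]
    exact ih _ (fun q hq => h q (by simp [hq]))

-- ===== VERDICT (by name: the statement is the Claim_ definition above) =====
theorem find_start_codons_spec : Claim_equal_find_start_codons := by
  intro sequences training_pairs _ hpre
  unfold Spec_find_start_codons find_start_codons find_start_codons_alt
  simp only []
  rw [pv_outer sequences training_pairs PySem.Dict.empty (fun p hp => (hpre p hp).2.2)]
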